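-- pv_equiv track=rewrite | github.com/uttammittal02/Python_files | MODEQ.py | non_factor_pairs
-- ===== SOURCE A (Python) =====
-- def non_factor_pairs(n,m) :
--     total = 0
--     def required_divisors(num,b) :
--         a,divisors = 1,0
--         while a*a <= num :
--             if num%a == 0  :
--                 if b > a and b%a != 0 :divisors += 1
--                 x = num//a
--                 if b > x and x!= a and b%x != 0 :divisors += 1
--             a += 1
--         return divisors
--
--     x = min(n,(m+1)//2)
--     for b in range(2,x + 1) :
--         num = m//b
--         total += required_divisors(num,b)
--
--     if n > m :
--         total += (n-m)*(m+n-1)//2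
--     return total
-- ===== SOURCE B (Python) =====
-- def non_factor_pairs(n, m):
--     x = min(n, (m + 1) // 2)
--     total = sum(1
--                 for b in range(2, x + 1)
--                 for d in range(1, min(b, m // b + 1))
--                 if (m // b) % d == 0 and b % d != 0)
--     if n > m:
--         total += (n - m) * (m + n - 1) // 2
--     return total
-- ===== Notes on version B (the rewrite author's own statement) =====
-- stated objective: simpler
-- what changed: Replaces A's sqrt-bounded divisor-pairing inner loop (enumerating a with a*a<=num and counting both a and num//a with a square/duplicate guard) by a plain linear scan d = 1..min(b, num+1)-1 counting d with num % d == 0 and b % d != 0; outer loop over b and the closed-form tail are unchanged.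
import Mathlib
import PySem

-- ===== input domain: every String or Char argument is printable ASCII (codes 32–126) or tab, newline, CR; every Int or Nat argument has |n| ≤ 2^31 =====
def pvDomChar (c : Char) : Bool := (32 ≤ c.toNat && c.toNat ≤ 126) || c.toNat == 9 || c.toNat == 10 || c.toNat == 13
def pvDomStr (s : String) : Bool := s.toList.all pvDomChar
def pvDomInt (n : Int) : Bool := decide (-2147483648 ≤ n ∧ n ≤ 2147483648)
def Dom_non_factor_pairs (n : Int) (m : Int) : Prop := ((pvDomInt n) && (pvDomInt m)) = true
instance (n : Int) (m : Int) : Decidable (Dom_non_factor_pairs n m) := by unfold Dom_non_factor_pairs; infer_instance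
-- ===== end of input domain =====

-- B replaces A's √num divisor-pairing inner loop by a plain linear scan d = 1 .. b-1
-- counting d with num % d == 0 and b % d != 0 (objective: simpler; no speed claim).

-- ===== PORT A =====
-- inner 'while a*a <= num' loop of required_divisors
def reqDivLoop (num b : Int) (a : Int) (divisors : Int) : Int :=
  if _h : a * a ≤ num then
    reqDivLoop num b (a + 1)
      (if PySem.Int.mod num a = 0 then
        (let d2 := if b > a ∧ PySem.Int.mod b a ≠ 0 then divisors + 1 else divisors
         let x := PySem.Int.floordiv num a
         if b > x ∧ x ≠ a ∧ PySem.Int.mod b x ≠ 0 then d2 + 1 else d2)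
       else divisors)
  else divisors
termination_by (num + 1 - a).toNat
decreasing_by
  have h1 : 0 ≤ a * a := mul_self_nonneg a
  have h2 : 2 * a - 1 ≤ a * a := by nlinarith [sq_nonneg (a - 1)]
  omega

def non_factor_pairs (n : Int) (m : Int) : Int :=
  let x := min n (PySem.Int.floordiv (m + 1) 2)
  let total := (PySem.List.pyRange 2 (x + 1) 1).foldl
      (fun total b => total + reqDivLoop (PySem.Int.floordiv m b) b 1 0) 0
  if n > m then total + PySem.Int.floordiv ((n - m) * (m + n - 1)) 2 else total

-- ===== PORT B =====
-- inner generator 'sum(1 for d in range(1, min(b, num + 1)) if num % d == 0 and b % d != 0)'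
def altCount (num b : Int) : Int :=
  (PySem.List.pyRange 1 (min b (num + 1)) 1).foldl
    (fun c d => if PySem.Int.mod num d = 0 ∧ PySem.Int.mod b d ≠ 0 then c + 1 else c) 0

def non_factor_pairs_alt (n : Int) (m : Int) : Int :=
  let x := min n (PySem.Int.floordiv (m + 1) 2)
  let total := (PySem.List.pyRange 2 (x + 1) 1).foldl
      (fun t b => t + altCount (PySem.Int.floordiv m b) b) 0
  if n > m then total + PySem.Int.floordiv ((n - m) * (m + n - 1)) 2 else total

-- ===== PRECONDITION & SPEC =====
def Spec_non_factor_pairs (n : Int) (m : Int) (out : Int) : Prop := out = non_factor_pairs_alt n m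
instance (n : Int) (m : Int) (out : Int) : Decidable (Spec_non_factor_pairs n m out) := by unfold Spec_non_factor_pairs; infer_instance

-- ===== CLAIM (what is proved, stated in full; the proofs are below) =====
def Claim_equal_non_factor_pairs : Prop := ∀ (n : Int) (m : Int), Dom_non_factor_pairs n m → Spec_non_factor_pairs n m (non_factor_pairs n m)

-- ===== LEMMAS AND PROOFS =====

-- the divisors d of num with d < b, d ∤ b, not yet counted when A's loop variable is a
noncomputable def uncounted (num b a : Int) : Finset Int :=
  (Finset.Icc 1 num).filter
    (fun d => num % d = 0 ∧ d < b ∧ ¬ b % d = 0 ∧ a ≤ d ∧ a ≤ num / d)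

lemma mem_uncounted {num b a d : Int} :
    d ∈ uncounted num b a ↔
      (1 ≤ d ∧ d ≤ num) ∧ num % d = 0 ∧ d < b ∧ ¬ b % d = 0 ∧ a ≤ d ∧ a ≤ num / d := by
  simp [uncounted, Finset.mem_filter, Finset.mem_Icc]

lemma reqDivLoop_inv (num b a acc : Int) (hnum : 1 ≤ num) (ha : 1 ≤ a) :
    reqDivLoop num b a acc = acc + (uncounted num b a).card := by
  by_cases h : a * a ≤ num
  · -- a * a ≤ num
    have ha1 : a ≤ num := by nlinarith
    have hax : a ≤ num / a := (Int.le_ediv_iff_mul_le (by omega)).2 (by linarith [h])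
    have hx1 : 1 ≤ num / a := le_trans ha hax
    have ha0 : (0 : Int) < a := by omega
    have hx0 : (0 : Int) < num / a := by omega
    rw [reqDivLoop, dif_pos h, reqDivLoop_inv num b (a + 1) _ hnum (by omega)]
    simp only [PySem.Int.mod_eq_emod_of_pos ha0, PySem.Int.floordiv_eq_ediv_of_pos ha0,
      PySem.Int.mod_eq_emod_of_pos hx0, gt_iff_lt]
    by_cases hdvd : num % a = 0
    · -- a divides num: the paired divisors a and x = num / a leave the uncounted set
      have hdva : a ∣ num := Int.dvd_of_emod_eq_zero hdvd
      have hxa : num / a * a = num := Int.ediv_mul_cancel hdva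
      have hxd : (num / a) ∣ num := ⟨a, hxa.symm⟩
      have hxmod : num % (num / a) = 0 := Int.emod_eq_zero_of_dvd hxd
      have hxnum : num / a ≤ num := by
        nlinarith [mul_nonneg (by omega : (0:Int) ≤ num / a) (by omega : (0:Int) ≤ a - 1)]
      have hdivx : num / (num / a) = a := by
        have h0 : num / a ≠ 0 := by omega
        have hc := Int.mul_ediv_cancel_left (a := num / a) (b := a) h0
        rw [hxa] at hc
        exact hc
      have hsub : uncounted num b (a + 1) ⊆ uncounted num b a := by
        intro d hd
        rw [mem_uncounted] at hd ⊢
        exact ⟨hd.1, hd.2.1, hd.2.2.1, hd.2.2.2.1, by omega, by omega⟩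
      have hdiff : uncounted num b a \ uncounted num b (a + 1) =
          ({a, num / a} : Finset Int).filter (fun d => d < b ∧ ¬ b % d = 0) := by
        ext d
        simp only [Finset.mem_sdiff, mem_uncounted, Finset.mem_filter, Finset.mem_insert,
          Finset.mem_singleton]
        constructor
        · rintro ⟨⟨hb1, h2, h3, h4, h5, h6⟩, hnot⟩
          refine ⟨?_, h3, h4⟩
          by_contra hne
          push Not at hne
          apply hnot
          have hda : d ≠ a := hne.1
          have hdx : num / d ≠ a := by
            intro hq
            apply hne.2
            have hdd : d ∣ num := Int.dvd_of_emod_eq_zero h2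
            have hw : num / d * d = num := Int.ediv_mul_cancel hdd
            rw [hq] at hw
            rw [← hw, Int.mul_ediv_cancel_left _ (by omega)]
          exact ⟨⟨hb1.1, hb1.2⟩, h2, h3, h4, by omega, by omega⟩
        · rintro ⟨hd, h3, h4⟩
          rcases hd with rfl | rfl
          · refine ⟨⟨⟨ha, ha1⟩, hdvd, h3, h4, le_rfl, hax⟩, ?_⟩
            rintro ⟨-, -, -, -, h5', -⟩
            omega
          · refine ⟨⟨⟨hx1, hxnum⟩, hxmod, h3, h4, hax, by rw [hdivx]⟩, ?_⟩
            rintro ⟨-, -, -, -, -, h6'⟩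
            rw [hdivx] at h6'
            omega
      have hcard : (uncounted num b a).card =
          (uncounted num b (a + 1)).card +
            (({a, num / a} : Finset Int).filter (fun d => d < b ∧ ¬ b % d = 0)).card := by
        have h2 := Finset.card_sdiff_add_card_eq_card hsub
        rw [hdiff] at h2
        omega
      have hT : ((({a, num / a} : Finset Int).filter (fun d => d < b ∧ ¬ b % d = 0)).card : Int) =
          (if a < b ∧ ¬ b % a = 0 then 1 else 0) +
          (if num / a < b ∧ num / a ≠ a ∧ ¬ b % (num / a) = 0 then 1 else 0) := by
        by_cases hxeq : num / a = a
        · rw [hxeq, Finset.insert_eq_self.2 (Finset.mem_singleton_self a),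
            Finset.filter_singleton]
          split_ifs <;> simp_all
        · have hne' : a ≠ num / a := fun hh => hxeq hh.symm
          rw [Finset.filter_insert, Finset.filter_singleton]
          split_ifs <;>
            simp_all [Finset.card_insert_of_notMem]
      rw [if_pos hdvd, hcard]
      push_cast [hT]
      split_ifs <;> omega
    · -- a does not divide num: the uncounted set is unchanged
      rw [if_neg hdvd]
      have heq : uncounted num b (a + 1) = uncounted num b a := by
        ext d
        rw [mem_uncounted, mem_uncounted]
        constructor
        · rintro ⟨hb1, h2, h3, h4, h5, h6⟩
          exact ⟨hb1, h2, h3, h4, by omega, by omega⟩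
        · rintro ⟨hb1, h2, h3, h4, h5, h6⟩
          refine ⟨hb1, h2, h3, h4, ?_, ?_⟩
          · rcases lt_or_eq_of_le h5 with h' | h'
            · omega
            · exfalso; apply hdvd; rw [h']; exact h2
          · rcases lt_or_eq_of_le h6 with h' | h'
            · omega
            · exfalso
              apply hdvd
              have hdd : d ∣ num := Int.dvd_of_emod_eq_zero h2
              have hq : num / d * d = num := Int.ediv_mul_cancel hdd
              rw [h']
              exact Int.emod_eq_zero_of_dvd ⟨d, hq.symm⟩
      rw [heq]
  · -- a * a > num: no divisor of num with min-part ≥ a remains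
    rw [reqDivLoop, dif_neg h]
    have hemp : uncounted num b a = ∅ := by
      apply Finset.eq_empty_iff_forall_notMem.2
      intro d hd
      rw [mem_uncounted] at hd
      obtain ⟨⟨hd1, hd2⟩, h2, _, _, h5, h6⟩ := hd
      have hdd : d ∣ num := Int.dvd_of_emod_eq_zero h2
      have hq : num / d * d = num := Int.ediv_mul_cancel hdd
      have : a * a ≤ d * (num / d) := mul_le_mul h5 h6 (by omega) (by omega)
      nlinarith
    rw [hemp]
    simp
termination_by (num + 1 - a).toNat
decreasing_by omega

lemma altCount_eq (num b : Int) (hnum : 1 ≤ num) :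
    altCount num b = (uncounted num b 1).card := by
  unfold altCount
  rw [PySem.List.foldl_ite_add_one, zero_add]
  congr 1
  have hnd : (PySem.List.pyRange 1 (min b (num + 1)) 1).Nodup :=
    PySem.List.nodup_pyRange_one 1 (min b (num + 1))
  rw [List.countP_eq_length_filter, ← List.toFinset_card_of_nodup (hnd.filter _)]
  congr 1
  ext d
  simp only [List.mem_toFinset, List.mem_filter, PySem.List.mem_pyRange_one, mem_uncounted,
    decide_eq_true_eq]
  constructor
  · rintro ⟨⟨h1, h2'⟩, hm⟩
    have h2 : d < b := lt_of_lt_of_le h2' (min_le_left _ _)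
    rw [PySem.Int.mod_eq_emod_of_pos (by omega), PySem.Int.mod_eq_emod_of_pos (by omega)] at hm
    have hdvd : d ∣ num := Int.dvd_of_emod_eq_zero hm.1
    have hdn : d ≤ num := Int.le_of_dvd (by omega) hdvd
    have hq : 1 ≤ num / d := (Int.le_ediv_iff_mul_le (by omega)).2 (by omega)
    exact ⟨⟨h1, hdn⟩, hm.1, h2, hm.2, h1, hq⟩
  · rintro ⟨⟨h1, h2⟩, hm1, hm2, hm3, -, -⟩
    refine ⟨⟨h1, lt_min hm2 (by omega)⟩, ?_⟩
    rw [PySem.Int.mod_eq_emod_of_pos (by omega), PySem.Int.mod_eq_emod_of_pos (by omega)]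
    exact ⟨hm1, hm3⟩

lemma inner_eq (num b : Int) (hnum : 1 ≤ num) :
    reqDivLoop num b 1 0 = altCount num b := by
  rw [reqDivLoop_inv num b 1 0 hnum le_rfl, altCount_eq num b hnum]
  simp

-- ===== VERDICT (by name: the statement is the Claim_ definition above) =====
theorem non_factor_pairs_spec : Claim_equal_non_factor_pairs := by
  intro n m _
  show non_factor_pairs n m = non_factor_pairs_alt n m
  have key : ∀ (t b : Int), b ∈ PySem.List.pyRange 2 (min n (PySem.Int.floordiv (m + 1) 2) + 1) 1 →
      t + reqDivLoop (PySem.Int.floordiv m b) b 1 0 = t + altCount (PySem.Int.floordiv m b) b := by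
    intro t b hb
    rw [PySem.List.mem_pyRange_one] at hb
    have hb2 : 2 ≤ b := hb.1
    have hbx : b ≤ PySem.Int.floordiv (m + 1) 2 := by
      have := min_le_right n (PySem.Int.floordiv (m + 1) 2); omega
    have hbm : b * 2 ≤ m + 1 := (PySem.Int.le_floordiv_iff_mul_le (by omega)).1 hbx
    have hnum : 1 ≤ PySem.Int.floordiv m b :=
      (PySem.Int.le_floordiv_iff_mul_le (by omega)).2 (by omega)
    rw [inner_eq _ _ hnum]
  have hfold : (PySem.List.pyRange 2 (min n (PySem.Int.floordiv (m + 1) 2) + 1) 1).foldl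
      (fun total b => total + reqDivLoop (PySem.Int.floordiv m b) b 1 0) 0 =
      (PySem.List.pyRange 2 (min n (PySem.Int.floordiv (m + 1) 2) + 1) 1).foldl
      (fun t b => t + altCount (PySem.Int.floordiv m b) b) 0 :=
    PySem.List.foldl_congr_mem _ _ _ 0 key
  simp only [non_factor_pairs, non_factor_pairs_alt, hfold]
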